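-- pv_equiv track=rewrite | github.com/lar-mo/AdventOfCode | 2015/day1pt1.py | whichFloor
-- ===== SOURCE A (Python) =====
-- def whichFloor(data):                               # define function
--     floor = 0                                       # initialize counter (ground floor)
--     for p in data:                                  # loop through each item in the list
--         if p == '(':                                # if item is open parentheses, ...
--             floor += 1                              # ... then increment floor by 1
--         else:                                       # else, ...
--             floor -= 1                              # ... then decrement floor by 1
--     return floor                                    # return final result (floor)
-- ===== SOURCE B (Python) =====
-- def whichFloor(data):
--     # closed form: each '(' is +1, every other char is -1
--     return 2 * data.count('(') - len(data)
-- ===== Notes on version B (the rewrite author's own statement) =====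
-- stated objective: simpler
-- what changed: Replaces the per-character accumulator loop with the closed-form expression 2*data.count('(') - len(data); no loop or running counter is maintained.
import Mathlib
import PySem

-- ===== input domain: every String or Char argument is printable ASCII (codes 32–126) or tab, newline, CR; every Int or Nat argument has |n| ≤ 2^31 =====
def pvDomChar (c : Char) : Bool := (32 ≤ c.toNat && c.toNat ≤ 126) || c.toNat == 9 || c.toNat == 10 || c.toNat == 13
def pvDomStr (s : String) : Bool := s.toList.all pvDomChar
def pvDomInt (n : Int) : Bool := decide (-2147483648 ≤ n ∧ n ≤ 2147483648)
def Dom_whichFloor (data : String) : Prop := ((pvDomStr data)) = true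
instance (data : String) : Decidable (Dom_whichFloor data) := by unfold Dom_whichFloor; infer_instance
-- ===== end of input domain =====

-- B replaces A's per-character accumulator loop with the closed form 2*count('(') - len(data) (simpler; same cost).


-- ===== PORT A =====
def whichFloor (data : String) : Int :=
  data.toList.foldl (fun floor p => if p = '(' then floor + 1 else floor - 1) 0

-- ===== PORT B =====
def whichFloor_alt (data : String) : Int :=
  2 * (PySem.Str.count data "(" : Int) - (PySem.Str.len data : Int)

-- ===== PRECONDITION & SPEC =====
def Spec_whichFloor (data : String) (out : Int) : Prop := out = whichFloor_alt data
instance (data : String) (out : Int) : Decidable (Spec_whichFloor data out) := by unfold Spec_whichFloor; infer_instance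

-- ===== CLAIM (what is proved, stated in full; the proofs are below) =====
def Claim_equal_whichFloor : Prop := ∀ (data : String), Dom_whichFloor data → Spec_whichFloor data (whichFloor data)

-- ===== LEMMAS AND PROOFS =====

-- ===== VERDICT (by name: the statement is the Claim_ definition above) =====
theorem go_singleton (c : Char) (l : List Char) (fuel acc : Nat) (h : l.length ≤ fuel) :
    PySem.Chars.count.go [c] fuel l acc = acc + l.count c := by
  induction l generalizing fuel acc with
  | nil => cases fuel <;> simp [PySem.Chars.count.go]
  | cons hd t ih =>
    cases fuel with
    | zero => simp at h
    | succ f =>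
      have hle : t.length ≤ f := by simpa using h
      simp only [PySem.Chars.count.go]
      by_cases hc : (c == hd) = true
      · rw [if_pos (by simp [List.isPrefixOf, hc])]
        rw [show ([c].length) = 1 from rfl, List.drop_one, List.tail_cons, ih f (acc + 1) hle,
          beq_iff_eq.mp hc, List.count_cons_self]
        omega
      · rw [if_neg (by simp [List.isPrefixOf, hc]), ih f acc hle,
          List.count_cons_of_ne (Ne.symm (by simpa using hc))]

theorem count_singleton (l : List Char) (c : Char) :
    PySem.Chars.count l [c] = l.count c := by
  simp [PySem.Chars.count, go_singleton c l l.length 0 le_rfl]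

theorem foldl_closed (l : List Char) (a : Int) :
    l.foldl (fun floor p => if p = '(' then floor + 1 else floor - 1) a
      = a + 2 * (l.count '(' : Int) - (l.length : Int) := by
  induction l generalizing a with
  | nil => simp
  | cons hd t ih =>
    simp only [List.foldl_cons, ih, List.count_cons, List.length_cons]
    by_cases hc : hd = '('
    · simp [hc]; ring
    · simp [hc]; ring

theorem whichFloor_spec : Claim_equal_whichFloor := by
  intro data _
  unfold Spec_whichFloor whichFloor whichFloor_alt
  simp [PySem.Str.count, PySem.Str.len, count_singleton, foldl_closed]
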